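-- pv_equiv track=rewrite | github.com/AbduhHub/TradeQuant | test_trend_pullback_sensitivity.py | generate_market
-- ===== SOURCE A (Python) =====
-- def generate_market(n=600):
--     price = 100
--     data = []
--
--     for i in range(n):
--         if i % 60 < 40:
--             price += 2
--         elif i % 60 < 50:
--             price -= 3
--         else:
--             price += 1 if i % 2 == 0 else -1
--         data.append(price)
--
--     return data
-- ===== SOURCE B (Python) =====
-- def generate_market(n=600):
--     # O(1) closed form per index: each full 60-step block nets +50,
--     # and within a block the cumulative offset has a direct formula.
--     def price(i):
--         q, r = divmod(i, 60)
--         base = 100 + 50 * q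
--         if r < 40:
--             return base + 2 * (r + 1)
--         if r < 50:
--             return base + 80 - 3 * (r - 39)
--         return base + (51 if r % 2 == 0 else 50)
--     return [price(i) for i in range(n)]
-- ===== Notes on version B (the rewrite author's own statement) =====
-- stated objective: alternative
-- what changed: A accumulates a running price sequentially; B computes each element independently from the quotient and remainder of its index by the block length, via a closed-form per-block offset formula.
import Mathlib
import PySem

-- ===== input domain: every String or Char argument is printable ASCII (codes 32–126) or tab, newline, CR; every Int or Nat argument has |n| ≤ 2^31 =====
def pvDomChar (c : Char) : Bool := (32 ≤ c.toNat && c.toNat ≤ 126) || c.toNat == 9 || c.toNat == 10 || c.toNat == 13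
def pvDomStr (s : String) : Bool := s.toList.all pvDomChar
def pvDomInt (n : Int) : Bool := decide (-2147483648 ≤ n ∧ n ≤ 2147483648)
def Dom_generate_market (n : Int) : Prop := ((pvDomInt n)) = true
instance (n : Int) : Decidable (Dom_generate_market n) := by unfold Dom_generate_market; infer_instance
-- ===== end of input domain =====

-- B replaces A's running-price accumulation by a closed-form per-index formula
-- built from the quotient and remainder of the index; same values, same O(n) total cost.


-- ===== PORT A =====
def generate_market (n : Int) : List Int :=
  ((PySem.List.pyRange 0 n 1).foldl (fun (st : Int × List Int) i =>
    let price :=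
      if PySem.Int.mod i 60 < 40 then st.1 + 2
      else if PySem.Int.mod i 60 < 50 then st.1 - 3
      else st.1 + (if PySem.Int.mod i 2 = 0 then 1 else -1)
    (price, st.2 ++ [price])) (100, [])).2

-- ===== PORT B =====
def gmPrice (i : Int) : Int :=
  let q := PySem.Int.floordiv i 60
  let r := PySem.Int.mod i 60
  let base := 100 + 50 * q
  if r < 40 then base + 2 * (r + 1)
  else if r < 50 then base + 80 - 3 * (r - 39)
  else base + (if PySem.Int.mod r 2 = 0 then 51 else 50)

def generate_market_alt (n : Int) : List Int :=
  (PySem.List.pyRange 0 n 1).map gmPrice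

-- ===== PRECONDITION & SPEC =====
def Spec_generate_market (n : Int) (out : List Int) : Prop := out = generate_market_alt n
instance (n : Int) (out : List Int) : Decidable (Spec_generate_market n out) := by unfold Spec_generate_market; infer_instance

-- ===== CLAIM (what is proved, stated in full; the proofs are below) =====
def Claim_equal_generate_market : Prop := ∀ (n : Int), Dom_generate_market n → Spec_generate_market n (generate_market n)

-- ===== LEMMAS AND PROOFS =====

-- A's update applied to the closed form at i-1 gives the closed form at i.
theorem gm_step (i : Int) :
    (if PySem.Int.mod i 60 < 40 then gmPrice (i - 1) + 2
     else if PySem.Int.mod i 60 < 50 then gmPrice (i - 1) - 3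
     else gmPrice (i - 1) + (if PySem.Int.mod i 2 = 0 then 1 else -1)) = gmPrice i := by
  have h60 : ∀ a : Int, PySem.Int.mod a 60 = a % 60 :=
    fun a => PySem.Int.mod_eq_emod_of_pos (by norm_num)
  have h2 : ∀ a : Int, PySem.Int.mod a 2 = a % 2 :=
    fun a => PySem.Int.mod_eq_emod_of_pos (by norm_num)
  have hd60 : ∀ a : Int, PySem.Int.floordiv a 60 = a / 60 :=
    fun a => PySem.Int.floordiv_eq_ediv_of_pos (by norm_num)
  simp only [gmPrice, h60, h2, hd60]
  split_ifs <;> omega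

-- Invariant for A's fold over range(0, m): final price is gmPrice (m-1), output is the map.
theorem gm_inv (m : Nat) :
    ((PySem.List.pyRange 0 m 1).foldl (fun (st : Int × List Int) i =>
      let price :=
        if PySem.Int.mod i 60 < 40 then st.1 + 2
        else if PySem.Int.mod i 60 < 50 then st.1 - 3
        else st.1 + (if PySem.Int.mod i 2 = 0 then 1 else -1)
      (price, st.2 ++ [price])) (100, []))
      = (gmPrice ((m : Int) - 1), (PySem.List.pyRange 0 m 1).map gmPrice) := by
  induction m with
  | zero => simp [PySem.List.pyRange_one_eq_nil (by norm_num : (0:Int) ≤ 0)]; decide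
  | succ k ih =>
    have hcast : ((k + 1 : Nat) : Int) = (k : Int) + 1 := by push_cast; ring
    rw [hcast, PySem.List.pyRange_one_succ_right (by positivity : (0:Int) ≤ (k : Int)),
      List.foldl_append, ih, List.map_append]
    simp only [List.foldl_cons, List.foldl_nil, List.map_cons, List.map_nil]
    have := gm_step (k : Int)
    simp only [add_sub_cancel_right]
    rw [this]

-- ===== VERDICT (by name: the statement is the Claim_ definition above) =====
theorem generate_market_spec : Claim_equal_generate_market := by
  intro n _
  unfold Spec_generate_market generate_market generate_market_alt
  by_cases h : n ≤ 0
  · simp [PySem.List.pyRange_one_eq_nil h]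
  · have hn : ((n.toNat : Nat) : Int) = n := Int.toNat_of_nonneg (by omega)
    rw [← hn, gm_inv]
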